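-- pv_equiv track=rewrite | github.com/SherryJZHOU/Connect-4 | agents.py | openEnded
-- ===== SOURCE A (Python) =====
-- def openEnded(list):
--     num1 = 0
--     num2 = 0
--     if len(list) <= 3:
--         if len(list) < 3:
--             return num1, num2
--         else:
--             for ind, val in enumerate(list):
--                 if ind == 0 and list[ind+1] == list[ind+2] and val == 0:
--                     if list[ind+1] == 1:
--                         num1 += 1
--                     elif list[ind+1] == -1:
--                         num2 += 1
--                 elif ind == 2 and list[ind-1] == list[ind-2] and val == 0:
--                     if list[ind-1] == 1:
--                         num1 += 1
--                     elif list[ind-1] == -1: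
--                         num2 += 1
--     else:
--         for ind, val in enumerate(list):
--             if val == 0:
--                 if ind - 2 >= 0 and ind + 2 <= (len(list)-1):
--                     if list[ind-1] == list[ind-2]:
--                         if list[ind-1] == 1:
--                             num1 += 1
--                         elif list[ind-1] == -1:
--                             num2 += 1
--                     if list[ind+1] == list[ind+2]:
--                         if list[ind + 1] == 1:
--                             num1 += 1
--                         elif list[ind + 1] == -1:
--                             num2 += 1
--                 elif ind - 2 < 0:
--                     if list[ind+1] == list[ind+2]:
--                         if list[ind + 1] == 1:
--                             num1 += 1
--                         elif list[ind + 1] == -1: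
--                             num2 += 1
--                 elif ind + 2 > len(list)-1:
--                     if list[ind-1] == list[ind-2]:
--                         if list[ind-1] == 1:
--                             num1 += 1
--                         elif list[ind-1] == -1:
--                             num2 += 1
--     return num1, num2
-- ===== SOURCE B (Python) =====
-- def openEnded(list):
--     num1 = 0
--     num2 = 0
--     for i in range(len(list) - 1):
--         v = list[i]
--         if v == list[i + 1] and (v == 1 or v == -1):
--             hits = 0
--             if i >= 1 and list[i - 1] == 0:
--                 hits += 1
--             if i + 2 <= len(list) - 1 and list[i + 2] == 0:
--                 hits += 1
--             if v == 1:
--                 num1 += hits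
--             else:
--                 num2 += hits
--     return num1, num2
-- ===== Notes on version B (the rewrite author's own statement) =====
-- stated objective: simpler
-- what changed: B inverts the traversal: instead of A's four-way special-cased scan over empty cells looking for adjacent same-token pairs on each side (with a separate hand-rolled branch pair for length-3 lists), B makes one uniform scan over adjacent pairs (i,i+1) of tokens 1/-1 and counts their empty neighbours, collapsing all of A's boundary branches into two range checks.
import Mathlib
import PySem

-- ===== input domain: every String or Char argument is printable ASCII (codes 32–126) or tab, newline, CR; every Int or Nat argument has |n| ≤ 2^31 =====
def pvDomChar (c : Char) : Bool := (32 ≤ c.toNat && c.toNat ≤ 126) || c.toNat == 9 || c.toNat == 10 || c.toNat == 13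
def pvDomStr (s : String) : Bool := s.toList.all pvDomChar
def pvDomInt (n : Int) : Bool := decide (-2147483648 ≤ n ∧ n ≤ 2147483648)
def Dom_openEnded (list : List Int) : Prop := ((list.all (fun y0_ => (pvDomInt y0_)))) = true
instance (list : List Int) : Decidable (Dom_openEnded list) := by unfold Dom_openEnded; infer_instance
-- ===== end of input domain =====

-- B replaces A's four-way special-cased scan over empty cells (plus a separate length-3 branch)
-- by one uniform scan over adjacent same-token pairs counting empty neighbours (objective: simpler).


-- ===== PORT A =====
-- list[j] is ported as pyGetD list j 0: every access A executes is in range, so the default is never read.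
def aStep3 (l : List Int) (st : Int × Int) (ind v : Int) : Int × Int :=
  if ind = 0 ∧ PySem.List.pyGetD l (ind+1) 0 = PySem.List.pyGetD l (ind+2) 0 ∧ v = 0 then
    if PySem.List.pyGetD l (ind+1) 0 = 1 then (st.1+1, st.2)
    else if PySem.List.pyGetD l (ind+1) 0 = -1 then (st.1, st.2+1)
    else st
  else if ind = 2 ∧ PySem.List.pyGetD l (ind-1) 0 = PySem.List.pyGetD l (ind-2) 0 ∧ v = 0 then
    if PySem.List.pyGetD l (ind-1) 0 = 1 then (st.1+1, st.2)
    else if PySem.List.pyGetD l (ind-1) 0 = -1 then (st.1, st.2+1)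
    else st
  else st

def aStepBig (l : List Int) (st : Int × Int) (ind v : Int) : Int × Int :=
  if v = 0 then
    if 0 ≤ ind - 2 ∧ ind + 2 ≤ (l.length : Int) - 1 then
      let st1 :=
        if PySem.List.pyGetD l (ind-1) 0 = PySem.List.pyGetD l (ind-2) 0 then
          if PySem.List.pyGetD l (ind-1) 0 = 1 then (st.1+1, st.2)
          else if PySem.List.pyGetD l (ind-1) 0 = -1 then (st.1, st.2+1)
          else st
        else st
      if PySem.List.pyGetD l (ind+1) 0 = PySem.List.pyGetD l (ind+2) 0 then
        if PySem.List.pyGetD l (ind+1) 0 = 1 then (st1.1+1, st1.2)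
        else if PySem.List.pyGetD l (ind+1) 0 = -1 then (st1.1, st1.2+1)
        else st1
      else st1
    else if ind - 2 < 0 then
      if PySem.List.pyGetD l (ind+1) 0 = PySem.List.pyGetD l (ind+2) 0 then
        if PySem.List.pyGetD l (ind+1) 0 = 1 then (st.1+1, st.2)
        else if PySem.List.pyGetD l (ind+1) 0 = -1 then (st.1, st.2+1)
        else st
      else st
    else if ind + 2 > (l.length : Int) - 1 then
      if PySem.List.pyGetD l (ind-1) 0 = PySem.List.pyGetD l (ind-2) 0 then
        if PySem.List.pyGetD l (ind-1) 0 = 1 then (st.1+1, st.2)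
        else if PySem.List.pyGetD l (ind-1) 0 = -1 then (st.1, st.2+1)
        else st
      else st
    else st
  else st

def openEnded (list : List Int) : Int × Int :=
  if list.length ≤ 3 then
    if list.length < 3 then (0, 0)
    else (PySem.List.enumerate list).foldl (fun st p => aStep3 list st p.1 p.2) (0, 0)
  else
    (PySem.List.enumerate list).foldl (fun st p => aStepBig list st p.1 p.2) (0, 0)

-- ===== PORT B =====
def bStep (l : List Int) (st : Int × Int) (i : Int) : Int × Int :=
  let v := PySem.List.pyGetD l i 0
  if v = PySem.List.pyGetD l (i+1) 0 ∧ (v = 1 ∨ v = -1) then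
    let hits : Int :=
      (if 1 ≤ i ∧ PySem.List.pyGetD l (i-1) 0 = 0 then 1 else 0) +
      (if i + 2 ≤ (l.length : Int) - 1 ∧ PySem.List.pyGetD l (i+2) 0 = 0 then 1 else 0)
    if v = 1 then (st.1 + hits, st.2) else (st.1, st.2 + hits)
  else st

def openEnded_alt (list : List Int) : Int × Int :=
  (PySem.List.pyRange 0 ((list.length : Int) - 1) 1).foldl (bStep list) (0, 0)

-- ===== PRECONDITION & SPEC =====
def Spec_openEnded (list : List Int) (out : Int × Int) : Prop := out = openEnded_alt list
instance (list : List Int) (out : Int × Int) : Decidable (Spec_openEnded list out) := by unfold Spec_openEnded; infer_instance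

-- ===== CLAIM (what is proved, stated in full; the proofs are below) =====
def Claim_equal_openEnded : Prop := ∀ (list : List Int), Dom_openEnded list → Spec_openEnded list (openEnded list)

-- ===== LEMMAS AND PROOFS =====

-- token vector: (1,0) for token 1, (0,1) for token -1, 0 otherwise
def tok (v : Int) : Int × Int := if v = 1 then (1, 0) else if v = -1 then (0, 1) else (0, 0)

-- A's per-cell contributions (left pair / right pair), normal form
def Lc (l : List Int) (i : Int) : Int × Int :=
  if PySem.List.pyGetD l i 0 = 0 ∧ 0 ≤ i - 2 ∧ PySem.List.pyGetD l (i-1) 0 = PySem.List.pyGetD l (i-2) 0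
  then tok (PySem.List.pyGetD l (i-1) 0) else 0

def Rc (l : List Int) (i : Int) : Int × Int :=
  if PySem.List.pyGetD l i 0 = 0 ∧ i + 2 ≤ (l.length : Int) - 1 ∧ PySem.List.pyGetD l (i+1) 0 = PySem.List.pyGetD l (i+2) 0
  then tok (PySem.List.pyGetD l (i+1) 0) else 0

-- B's per-pair contributions (left neighbour / right neighbour)
def BLc (l : List Int) (i : Int) : Int × Int :=
  if PySem.List.pyGetD l i 0 = PySem.List.pyGetD l (i+1) 0 ∧ (PySem.List.pyGetD l i 0 = 1 ∨ PySem.List.pyGetD l i 0 = -1)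
      ∧ 1 ≤ i ∧ PySem.List.pyGetD l (i-1) 0 = 0
  then tok (PySem.List.pyGetD l i 0) else 0

def BRc (l : List Int) (i : Int) : Int × Int :=
  if PySem.List.pyGetD l i 0 = PySem.List.pyGetD l (i+1) 0 ∧ (PySem.List.pyGetD l i 0 = 1 ∨ PySem.List.pyGetD l i 0 = -1)
      ∧ i + 2 ≤ (l.length : Int) - 1 ∧ PySem.List.pyGetD l (i+2) 0 = 0
  then tok (PySem.List.pyGetD l i 0) else 0

theorem inc_eq (st : Int × Int) (x : Int) :
    (if x = 1 then (st.1 + 1, st.2) else if x = -1 then (st.1, st.2 + 1) else st) = st + tok x := by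
  unfold tok; split_ifs <;> simp [Prod.ext_iff]

theorem tok_eq_zero {x : Int} (h1 : ¬ x = 1) (h2 : ¬ x = -1) : tok x = 0 := by
  unfold tok; rw [if_neg h1, if_neg h2]; rfl

theorem foldl_addP {γ : Type} (f : γ → Int × Int) (l : List γ) (a : Int × Int) :
    l.foldl (fun st x => st + f x) a = a + (l.map f).sum := by
  induction l generalizing a with
  | nil => simp
  | cons x xs ih => simp [ih, add_assoc]

theorem sum_map_range (f : Nat → Int × Int) (n : Nat) :
    ((List.range n).map f).sum = ∑ k ∈ Finset.range n, f k := by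
  induction n with
  | zero => simp
  | succ n ih => simp [List.range_succ, Finset.sum_range_succ, ih]

theorem aStepBig_eq (l : List Int) (st : Int × Int) (i : Int) (hn : 4 ≤ l.length) :
    aStepBig l st i (PySem.List.pyGetD l i 0) = st + (Lc l i + Rc l i) := by
  have hn' : (4 : Int) ≤ (l.length : Int) := by exact_mod_cast hn
  simp only [aStepBig, Lc, Rc, inc_eq]
  by_cases h0 : PySem.List.pyGetD l i 0 = 0
  · by_cases h2 : 0 ≤ i - 2 <;> by_cases h3 : i + 2 ≤ (l.length : Int) - 1
    · -- interior cell: both sides checked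
      rw [if_pos h0, if_pos ⟨h2, h3⟩]
      by_cases hL : PySem.List.pyGetD l (i-1) 0 = PySem.List.pyGetD l (i-2) 0 <;>
        by_cases hR : PySem.List.pyGetD l (i+1) 0 = PySem.List.pyGetD l (i+2) 0 <;>
        simp only [hL, hR, h0, h2, h3, if_true, if_false, true_and, and_true, eq_self_iff_true,
          if_pos, if_neg] <;>
        abel
    · -- right end: left pair only
      rw [if_pos h0, if_neg (fun h => h3 h.2), if_neg (by omega), if_pos (by omega)]
      by_cases hL : PySem.List.pyGetD l (i-1) 0 = PySem.List.pyGetD l (i-2) 0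
      · rw [if_pos hL, if_pos ⟨h0, h2, hL⟩, if_neg (fun h => h3 h.2.1)]; abel
      · rw [if_neg hL, if_neg (fun h => hL h.2.2), if_neg (fun h => h3 h.2.1)]; abel
    · -- left end: right pair only
      rw [if_pos h0, if_neg (fun h => h2 h.1), if_pos (by omega)]
      by_cases hR : PySem.List.pyGetD l (i+1) 0 = PySem.List.pyGetD l (i+2) 0
      · rw [if_pos hR, if_neg (fun h => h2 h.2.1), if_pos ⟨h0, h3, hR⟩]; abel
      · rw [if_neg hR, if_neg (fun h => h2 h.2.1), if_neg (fun h => hR h.2.2)]; abel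
    · -- impossible given len ≥ 4: i < 2 and i + 2 > len - 1
      omega
  · rw [if_neg h0, if_neg (fun h => h0 h.1), if_neg (fun h => h0 h.1)]; abel

theorem bStep_eq (l : List Int) (st : Int × Int) (i : Int) :
    bStep l st i = st + (BLc l i + BRc l i) := by
  simp only [bStep, BLc, BRc]
  by_cases hc : PySem.List.pyGetD l i 0 = PySem.List.pyGetD l (i+1) 0 ∧
      (PySem.List.pyGetD l i 0 = 1 ∨ PySem.List.pyGetD l i 0 = -1)
  · obtain ⟨hpair, hpm⟩ := hc
    rw [if_pos ⟨hpair, hpm⟩]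
    rcases hpm with hv | hv
    · rw [if_pos hv]
      by_cases hL : 1 ≤ i ∧ PySem.List.pyGetD l (i-1) 0 = 0 <;>
        by_cases hR : i + 2 ≤ (l.length : Int) - 1 ∧ PySem.List.pyGetD l (i+2) 0 = 0
      · rw [if_pos hL, if_pos hR, if_pos ⟨hpair, Or.inl hv, hL.1, hL.2⟩,
          if_pos ⟨hpair, Or.inl hv, hR.1, hR.2⟩]
        simp [hv, tok, Prod.ext_iff]
      · rw [if_pos hL, if_neg hR, if_pos ⟨hpair, Or.inl hv, hL.1, hL.2⟩,
          if_neg (fun h => hR ⟨h.2.2.1, h.2.2.2⟩)]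
        simp [hv, tok, Prod.ext_iff]
      · rw [if_neg hL, if_pos hR, if_neg (fun h => hL ⟨h.2.2.1, h.2.2.2⟩),
          if_pos ⟨hpair, Or.inl hv, hR.1, hR.2⟩]
        simp [hv, tok, Prod.ext_iff]
      · rw [if_neg hL, if_neg hR, if_neg (fun h => hL ⟨h.2.2.1, h.2.2.2⟩),
          if_neg (fun h => hR ⟨h.2.2.1, h.2.2.2⟩)]
        simp [hv, tok, Prod.ext_iff]
    · rw [if_neg (by rw [hv]; norm_num)]
      by_cases hL : 1 ≤ i ∧ PySem.List.pyGetD l (i-1) 0 = 0 <;>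
        by_cases hR : i + 2 ≤ (l.length : Int) - 1 ∧ PySem.List.pyGetD l (i+2) 0 = 0
      · rw [if_pos hL, if_pos hR, if_pos ⟨hpair, Or.inr hv, hL.1, hL.2⟩,
          if_pos ⟨hpair, Or.inr hv, hR.1, hR.2⟩]
        simp [hv, tok, Prod.ext_iff]
      · rw [if_pos hL, if_neg hR, if_pos ⟨hpair, Or.inr hv, hL.1, hL.2⟩,
          if_neg (fun h => hR ⟨h.2.2.1, h.2.2.2⟩)]
        simp [hv, tok, Prod.ext_iff]
      · rw [if_neg hL, if_pos hR, if_neg (fun h => hL ⟨h.2.2.1, h.2.2.2⟩),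
          if_pos ⟨hpair, Or.inr hv, hR.1, hR.2⟩]
        simp [hv, tok, Prod.ext_iff]
      · rw [if_neg hL, if_neg hR, if_neg (fun h => hL ⟨h.2.2.1, h.2.2.2⟩),
          if_neg (fun h => hR ⟨h.2.2.1, h.2.2.2⟩)]
        simp [hv, tok, Prod.ext_iff]
  · rw [if_neg hc, if_neg (fun h => hc ⟨h.1, h.2.1⟩), if_neg (fun h => hc ⟨h.1, h.2.1⟩)]
    abel

theorem openEnded_big (l : List Int) (hn : 4 ≤ l.length) :
    openEnded l = ∑ k ∈ Finset.range l.length, (Lc l k + Rc l k) := by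
  unfold openEnded
  rw [if_neg (by omega)]
  rw [PySem.List.enumerate_eq_map_pyRange l (0 : Int), List.foldl_map]
  have hstep : ∀ (st : Int × Int) (j : Int),
      aStepBig l st j (PySem.List.pyGetD l j 0) = st + (Lc l j + Rc l j) :=
    fun st j => aStepBig_eq l st j hn
  simp only [hstep]
  rw [foldl_addP, PySem.List.pyRange_one]
  simp only [List.map_map, Function.comp, sub_zero, zero_add]
  rw [sum_map_range]
  rw [Prod.mk_zero_zero, zero_add]
  congr 1

theorem openEnded_alt_sum (l : List Int) :
    openEnded_alt l = ∑ k ∈ Finset.range ((l.length : Int) - 1).toNat, (BLc l k + BRc l k) := by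
  unfold openEnded_alt
  rw [show bStep l = (fun st j => st + (BLc l j + BRc l j)) from
    funext fun st => funext fun j => bStep_eq l st j]
  rw [foldl_addP, PySem.List.pyRange_one]
  simp only [List.map_map, Function.comp, sub_zero, zero_add]
  rw [sum_map_range]
  rw [Prod.mk_zero_zero, zero_add]
  congr 1

theorem Rc_eq_BLc (l : List Int) (k : Nat) (hk : (k : Int) + 2 ≤ (l.length : Int) - 1) :
    Rc l k = BLc l ((k : Int) + 1) := by
  unfold Rc BLc
  rw [show ((k : Int) + 1 + 1 = (k : Int) + 2) from by ring,
      show ((k : Int) + 1 - 1 = (k : Int)) from by ring]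
  have hk1 : (1 : Int) ≤ (k : Int) + 1 := by omega
  by_cases hA : PySem.List.pyGetD l k 0 = 0 <;>
    by_cases hP : PySem.List.pyGetD l ((k : Int) + 1) 0 = PySem.List.pyGetD l ((k : Int) + 2) 0
  · rw [if_pos ⟨hA, hk, hP⟩]
    by_cases hpm : PySem.List.pyGetD l ((k : Int) + 1) 0 = 1 ∨ PySem.List.pyGetD l ((k : Int) + 1) 0 = -1
    · rw [if_pos ⟨hP, hpm, hk1, hA⟩]
    · push_neg at hpm
      rw [if_neg (fun h => (h.2.1).elim hpm.1 hpm.2), tok_eq_zero hpm.1 hpm.2]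
  · rw [if_neg (fun h => hP h.2.2), if_neg (fun h => hP h.1)]
  · rw [if_neg (fun h => hA h.1), if_neg (fun h => hA h.2.2.2)]
  · rw [if_neg (fun h => hA h.1), if_neg (fun h => hP h.1)]

theorem Lc_eq_BRc (l : List Int) (k : Nat) (hk : (k : Int) + 2 ≤ (l.length : Int) - 1) :
    Lc l ((k : Int) + 2) = BRc l k := by
  unfold Lc BRc
  rw [show ((k : Int) + 2 - 1 = (k : Int) + 1) from by ring,
      show ((k : Int) + 2 - 2 = (k : Int)) from by ring]
  have hk2 : (0 : Int) ≤ (k : Int) := by omega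
  by_cases hA : PySem.List.pyGetD l ((k : Int) + 2) 0 = 0 <;>
    by_cases hP : PySem.List.pyGetD l ((k : Int) + 1) 0 = PySem.List.pyGetD l (k : Int) 0
  · rw [if_pos ⟨hA, hk2, hP⟩]
    by_cases hpm : PySem.List.pyGetD l (k : Int) 0 = 1 ∨ PySem.List.pyGetD l (k : Int) 0 = -1
    · rw [if_pos ⟨hP.symm, hpm, hk, hA⟩, hP]
    · push_neg at hpm
      rw [if_neg (fun h => (h.2.1).elim hpm.1 hpm.2), hP, tok_eq_zero hpm.1 hpm.2]
  · rw [if_neg (fun h => hP h.2.2), if_neg (fun h => hP (h.1).symm)]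
  · rw [if_neg (fun h => hA h.1), if_neg (fun h => hA h.2.2.2)]
  · rw [if_neg (fun h => hA h.1), if_neg (fun h => hP (h.1).symm)]

theorem sum_big (l : List Int) (hn : 4 ≤ l.length) :
    ∑ k ∈ Finset.range l.length, (Lc l k + Rc l k)
      = ∑ k ∈ Finset.range (l.length - 1), (BLc l k + BRc l k) := by
  obtain ⟨m, hm2, hm⟩ : ∃ m, 2 ≤ m ∧ l.length = m + 2 := ⟨l.length - 2, by omega, by omega⟩
  have hlen : (l.length : Int) = (m : Int) + 2 := by rw [hm]; push_cast; ring
  rw [hm, show m + 2 - 1 = m + 1 from by omega]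
  rw [Finset.sum_add_distrib, Finset.sum_add_distrib]
  have hR : ∑ k ∈ Finset.range (m + 2), Rc l k = ∑ k ∈ Finset.range (m + 1), BLc l k := by
    rw [Finset.sum_range_succ, Finset.sum_range_succ, Finset.sum_range_succ']
    have e1 : Rc l ((m + 1 : Nat) : Int) = 0 := by
      unfold Rc; rw [if_neg (fun h => by push_cast at h; omega)]
    have e2 : Rc l ((m : Nat) : Int) = 0 := by
      unfold Rc; rw [if_neg (fun h => by omega)]
    have e3 : BLc l ((0 : Nat) : Int) = 0 := by
      unfold BLc; rw [if_neg (fun h => by have := h.2.2.1; norm_num at this)]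
    rw [e1, e2, e3]
    simp only [add_zero]
    refine Finset.sum_congr rfl fun k hk => ?_
    have hkm : k < m := Finset.mem_range.mp hk
    rw [Rc_eq_BLc l k (by omega)]
    congr 1
  have hL : ∑ k ∈ Finset.range (m + 2), Lc l k = ∑ k ∈ Finset.range (m + 1), BRc l k := by
    rw [Finset.sum_range_succ', Finset.sum_range_succ', Finset.sum_range_succ]
    have e1 : Lc l ((0 : Nat) : Int) = 0 := by
      unfold Lc; rw [if_neg (fun h => by have := h.2.1; norm_num at this)]
    have e2 : Lc l ((0 + 1 : Nat) : Int) = 0 := by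
      unfold Lc; rw [if_neg (fun h => by have := h.2.1; norm_num at this)]
    have e3 : BRc l ((m : Nat) : Int) = 0 := by
      unfold BRc; rw [if_neg (fun h => by omega)]
    rw [e1, e2, e3]
    simp only [add_zero]
    refine Finset.sum_congr rfl fun k hk => ?_
    have hkm : k < m := Finset.mem_range.mp hk
    rw [show (((k + 1 + 1 : Nat)) : Int) = (k : Int) + 2 from by push_cast; ring]
    exact Lc_eq_BRc l k (by omega)
  rw [hR, hL, add_comm]

theorem small3 (a b c : Int) : openEnded [a, b, c] = openEnded_alt [a, b, c] := by
  unfold openEnded openEnded_alt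
  have h1 : PySem.List.enumerate [a, b, c] = [(0, a), (1, b), (2, c)] := by
    norm_num [PySem.List.enumerate_cons, PySem.List.enumerate_nil]
  have h2 : PySem.List.pyRange 0 (2 : Int) 1 = [0, 1] := by decide
  rw [show ([a, b, c] : List Int).length = 3 from rfl, if_pos (by omega), if_neg (by omega),
    h1, show (((3 : Nat) : Int) - 1 = 2) from by norm_num, h2]
  simp only [List.foldl_cons, List.foldl_nil, aStep3, bStep]
  norm_num [PySem.List.pyGetD_ofNat']
  split_ifs <;> simp [Prod.ext_iff] <;> omega

theorem small_le2 (l : List Int) (hl : l.length ≤ 2) : openEnded l = openEnded_alt l := by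
  rcases l with _ | ⟨a, _ | ⟨b, _ | ⟨c, t⟩⟩⟩
  · unfold openEnded openEnded_alt
    norm_num [PySem.List.pyRange_one]
  · unfold openEnded openEnded_alt
    norm_num [PySem.List.pyRange_one]
  · unfold openEnded openEnded_alt
    norm_num [PySem.List.pyRange_one, List.range_succ, bStep, PySem.List.pyGetD_ofNat']
  · simp at hl

-- ===== VERDICT (by name: the statement is the Claim_ definition above) =====
theorem openEnded_spec : Claim_equal_openEnded := by
  intro l _hd
  unfold Spec_openEnded
  rcases l with _ | ⟨a, _ | ⟨b, _ | ⟨c, _ | ⟨d, rest⟩⟩⟩⟩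
  · exact small_le2 [] (by simp)
  · exact small_le2 [a] (by simp)
  · exact small_le2 [a, b] (by simp)
  · exact small3 a b c
  · have hn : 4 ≤ (a :: b :: c :: d :: rest).length := by simp
    rw [openEnded_big _ hn, openEnded_alt_sum, sum_big _ hn]
    have ht : (((a :: b :: c :: d :: rest).length : Int) - 1).toNat
        = (a :: b :: c :: d :: rest).length - 1 := by omega
    rw [ht]
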